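-- pv_equiv track=rewrite | github.com/Monolith28/Python-Projects | traingame_optimised.py | bracket_splice
-- ===== SOURCE A (Python) =====
-- def bracket_splice(exp: str):
--
--     #a list of tuples. The first entry is the bracket string, the second is a
--     #list of which index to insert these at in the original 14 character expression
--     #When inserting these the expression becomes longer, so the new splice function
--     #should iterate the subsequent indices as it inserts
--     bracket_pos = [
--         #1+1+1+1
--         ("()",[0,3]), #(1+1)+1+1
--         ("()", [4,7]), #1 +1+(1+1)
--         ("(())", [0,0,3,5]), #((1+1)+1)+1
--         ("(())",[2,4,7,7]), #1+(1+(1+1))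
--         ("()()",[0,3,4,7]), #(1+1)+(1+1)
--         ("()", [2,5]) #1+(1+1)+1
--     ]
--
--     variations = []
--
--     for situation in bracket_pos:
--         b_exp = exp[:] + " " #add a space to help with bracket insertion
--         b_str = situation[0] #string of brackets to insert
--         b_index = situation[1] #location of brackets to insert
--         i = 0
--         n = 0 #shifts ll the bracket location indices as new characters inserted
--         for i in range(len(b_str)):
--             b_exp = b_exp[:b_index[i]+n] + b_str[i] + b_exp[b_index[i]+n:]
--             i +=1
--             n +=1
--         variations.append(b_exp[:len(b_exp)-1])
--     return variations
-- ===== SOURCE B (Python) =====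
-- def bracket_splice(exp: str):
--     # same 6-entry bracket table as the original
--     bracket_pos = [
--         ("()", [0, 3]),
--         ("()", [4, 7]),
--         ("(())", [0, 0, 3, 5]),
--         ("(())", [2, 4, 7, 7]),
--         ("()()", [0, 3, 4, 7]),
--         ("()", [2, 5]),
--     ]
--     s = exp + " "  # trailing space, as in the original padding trick
--     variations = []
--     for b_str, b_index in bracket_pos:
--         pieces = []
--         prev = 0
--         for ch, idx in zip(b_str, b_index):
--             pieces.append(s[prev:idx])
--             pieces.append(ch)
--             prev = idx
--         pieces.append(s[prev:])
--         variations.append("".join(pieces)[:-1])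
--     return variations
-- ===== Notes on version B (the rewrite author's own statement) =====
-- stated objective: simpler
-- what changed: B builds each variation in one left-to-right pass by partitioning the expression at the (non-decreasing) insertion indices and joining the pieces with the bracket characters, instead of A's repeated re-splicing of a growing string with a running index offset.
import Mathlib
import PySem

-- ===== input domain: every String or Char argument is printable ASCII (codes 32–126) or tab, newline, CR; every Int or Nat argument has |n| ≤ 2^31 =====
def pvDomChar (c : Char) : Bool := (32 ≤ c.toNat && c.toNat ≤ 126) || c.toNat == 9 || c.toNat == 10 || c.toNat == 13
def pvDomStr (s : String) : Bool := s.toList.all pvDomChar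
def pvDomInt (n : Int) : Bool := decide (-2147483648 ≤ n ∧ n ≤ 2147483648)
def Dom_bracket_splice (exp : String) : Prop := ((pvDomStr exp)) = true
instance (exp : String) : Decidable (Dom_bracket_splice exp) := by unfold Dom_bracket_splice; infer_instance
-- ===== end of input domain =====

-- B replaces A's repeated re-splicing of a growing string (with a running index offset)
-- by a single left-to-right partition of the padded expression at the non-decreasing
-- insertion indices, joined with the bracket characters: same output, one pass (objective: simpler).

-- ===== PORT A =====
-- The fixed bracket table of A (bracket string, insertion indices into the original expression).
def bracketPos : List (List Char × List Nat) :=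
  [ (['(', ')'], [0, 3]),
    (['(', ')'], [4, 7]),
    (['(', '(', ')', ')'], [0, 0, 3, 5]),
    (['(', '(', ')', ')'], [2, 4, 7, 7]),
    (['(', ')', '(', ')'], [0, 3, 4, 7]),
    (['(', ')'], [2, 5]) ]

-- A's inner loop: insert each bracket char at b_index[i] + n into the growing string.
-- b_exp[:q] / b_exp[q:] for the nonnegative index q are Python's clamped slices,
-- which are exactly List.take q / List.drop q (PySem.List.slice_natCast).
def insLoopA (bexp : List Char) (n : Nat) : List (Char × Nat) → List Char
  | [] => bexp
  | (c, p) :: rest => insLoopA (bexp.take (p + n) ++ c :: bexp.drop (p + n)) (n + 1) rest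

def bracket_splice (exp : String) : List String :=
  bracketPos.foldl (fun variations situation =>
    let b_exp := exp.toList ++ [' ']           -- exp[:] + " "
    let r := insLoopA b_exp 0 (situation.1.zip situation.2)
    variations ++ [String.ofList (r.take (r.length - 1))])  -- b_exp[:len(b_exp)-1]
    []

-- ===== PORT B =====
-- B's inner loop: walk the pieces s[prev:idx] interleaved with the bracket chars, then s[prev:].
def spliceB (s : List Char) (pv : Nat) : List (Char × Nat) → List Char
  | [] => s.drop pv
  | (c, p) :: rest => (s.drop pv).take (p - pv) ++ c :: spliceB s p rest

def bracket_splice_alt (exp : String) : List String :=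
  let s := exp.toList ++ [' ']
  bracketPos.map (fun sit => String.ofList (spliceB s 0 (sit.1.zip sit.2)).dropLast)

-- ===== PRECONDITION & SPEC =====
def Spec_bracket_splice (exp : String) (out : List String) : Prop := out = bracket_splice_alt exp
instance (exp : String) (out : List String) : Decidable (Spec_bracket_splice exp out) := by unfold Spec_bracket_splice; infer_instance

-- ===== CLAIM (what is proved, stated in full; the proofs are below) =====
def Claim_equal_bracket_splice : Prop := ∀ (exp : String), Dom_bracket_splice exp → Spec_bracket_splice exp (bracket_splice exp)

-- ===== LEMMAS AND PROOFS =====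

-- Invariant identity: A's sequential insertion into the growing string 'done ++ s.drop pv'
-- equals B's partition-and-join, as long as the insertion indices are non-decreasing
-- and 'done' has the length the offset accounting predicts.
theorem insLoopA_eq_spliceB (L : List (Char × Nat)) :
    ∀ (s done : List Char) (pv n : Nat),
      (L.map Prod.snd).Pairwise (· ≤ ·) →
      (∀ q ∈ L, pv ≤ q.2) →
      done.length = min pv s.length + n →
      insLoopA (done ++ s.drop pv) n L = done ++ spliceB s pv L := by
  induction L with
  | nil => intro s done pv n _ _ _; simp [insLoopA, spliceB]
  | cons hd rest ih =>
    rintro s done pv n hpair hlb hlen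
    obtain ⟨c, p⟩ := hd
    have hpv : pv ≤ p := hlb (c, p) (List.mem_cons_self ..)
    have hdl : done.length ≤ p + n := by
      have := Nat.min_le_left pv s.length; omega
    simp only [insLoopA, spliceB]
    have htake : (done ++ s.drop pv).take (p + n)
        = done ++ (s.drop pv).take (p - pv) := by
      rw [List.take_append, List.take_of_length_le hdl]
      congr 1
      by_cases h : pv ≤ s.length
      · have : p + n - done.length = p - pv := by omega
        rw [this]
      · have h1 : s.drop pv = [] := List.drop_eq_nil_of_le (by omega)
        simp [h1]
    have hdrop : (done ++ s.drop pv).drop (p + n) = s.drop p := by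
      rw [List.drop_append, List.drop_eq_nil_of_le hdl]
      by_cases h : pv ≤ s.length
      · have : p + n - done.length = p - pv := by omega
        rw [this]
        simp only [List.nil_append, List.drop_drop]
        congr 1; omega
      · have h1 : s.drop pv = [] := List.drop_eq_nil_of_le (by omega)
        have h2 : s.drop p = [] := List.drop_eq_nil_of_le (by omega)
        simp [h1, h2]
    rw [htake, hdrop]
    have harg : done ++ (s.drop pv).take (p - pv) ++ c :: s.drop p
        = (done ++ (s.drop pv).take (p - pv) ++ [c]) ++ s.drop p := by simp
    rw [harg]
    have hp' : (∀ (a' : ℕ) (x : Char), (x, a') ∈ rest → p ≤ a') ∧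
        List.Pairwise (· ≤ ·) (rest.map Prod.snd) := by simpa using hpair
    have := ih s (done ++ (s.drop pv).take (p - pv) ++ [c]) p (n + 1)
      hp'.2
      (by intro q hq; exact hp'.1 q.2 q.1 (by simpa using hq))
      (by
        simp only [List.length_append, List.length_take, List.length_drop,
          List.length_cons, List.length_nil, hlen]
        omega)
    rw [this]
    simp

-- take (length - 1) is dropLast.
theorem take_len_sub_one (l : List Char) : l.take (l.length - 1) = l.dropLast := by
  rw [List.dropLast_eq_take]

-- Per-pattern equality, for any concrete pattern of the table.
theorem pattern_eq (s : List Char) (bstr : List Char) (bidx : List Nat)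
    (hpair : ((bstr.zip bidx).map Prod.snd).Pairwise (· ≤ ·)) :
    String.ofList ((insLoopA s 0 (bstr.zip bidx)).take
        ((insLoopA s 0 (bstr.zip bidx)).length - 1))
      = String.ofList (spliceB s 0 (bstr.zip bidx)).dropLast := by
  have h := insLoopA_eq_spliceB (bstr.zip bidx) s [] 0 0 hpair
    (fun q _ => Nat.zero_le _) (by simp)
  simp only [List.drop_zero, List.nil_append] at h
  rw [h, take_len_sub_one]

-- ===== VERDICT (by name: the statement is the Claim_ definition above) =====
theorem bracket_splice_spec : Claim_equal_bracket_splice := by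
  intro exp _
  unfold Spec_bracket_splice bracket_splice bracket_splice_alt bracketPos
  simp only [List.foldl_cons, List.foldl_nil, List.map_cons, List.map_nil,
    List.nil_append]
  rw [pattern_eq, pattern_eq, pattern_eq, pattern_eq, pattern_eq, pattern_eq]
  · simp
  all_goals decide
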